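-- pv_equiv track=rewrite | github.com/naydichev/picrosolve | picrosolve/solver/strategies/overlap.py | find_overlaps
-- ===== SOURCE A (Python) =====
-- def find_overlaps(possibles):
--     def get_val(x):
--         if all(x):
--             return 1
--         elif all([1 if z == 0 else 0 for z in x]):
--             return 0
--         else:
--             return None
--     return [get_val(x) for x in zip(*possibles)]
-- ===== SOURCE B (Python) =====
-- def find_overlaps(possibles):
--     if not possibles:
--         return []
--     m = min(len(r) for r in possibles)
--     all_nz = [True] * m
--     all_z = [True] * m
--     for r in possibles:
--         for j in range(m):
--             if r[j] == 0:
--                 all_nz[j] = False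
--             else:
--                 all_z[j] = False
--     return [1 if all_nz[j] else (0 if all_z[j] else None) for j in range(m)]
-- ===== Notes on version B (the rewrite author's own statement) =====
-- stated objective: alternative
-- what changed: Replaces the zip(*possibles) transpose plus per-column get_val with a single row-wise pass maintaining two per-column boolean flags (all-nonzero / all-zero), then builds the result column by column.
import Mathlib
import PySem

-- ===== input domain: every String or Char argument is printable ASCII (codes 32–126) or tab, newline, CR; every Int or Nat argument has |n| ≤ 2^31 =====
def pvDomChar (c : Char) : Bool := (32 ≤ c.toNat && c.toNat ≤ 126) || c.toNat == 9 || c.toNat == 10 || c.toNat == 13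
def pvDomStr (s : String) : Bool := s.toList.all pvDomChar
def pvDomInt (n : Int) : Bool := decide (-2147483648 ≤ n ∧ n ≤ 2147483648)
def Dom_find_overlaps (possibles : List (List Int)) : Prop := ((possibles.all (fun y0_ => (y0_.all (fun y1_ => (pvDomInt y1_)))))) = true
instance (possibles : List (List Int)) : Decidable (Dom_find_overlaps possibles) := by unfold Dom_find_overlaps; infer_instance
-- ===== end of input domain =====

-- B replaces A's zip(*possibles) transpose + per-column get_val with one row-wise
-- pass maintaining two per-column boolean flags; same cost, different decomposition.

-- ===== PORT A =====
-- shared helper: number of columns of zip(*rows) / min row length (0 for [])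
def pvMinLen (rows : List (List Int)) : Nat :=
  match rows with
  | [] => 0
  | r :: rs => rs.foldl (fun a b => min a b.length) r.length

-- zip(*rows): the list of columns, truncated to the minimum row length; zip() = []
def pvZipStar (rows : List (List Int)) : List (List Int) :=
  match rows with
  | [] => []
  | _ => (List.range (pvMinLen rows)).map (fun j => rows.map (fun r => r.getD j 0))

-- get_val: all(x) on ints = all nonzero; the listcomp test = all zero
def pvGetVal (x : List Int) : Option Int :=
  if x.all (fun z => decide (z ≠ 0)) then some 1
  else if (x.map (fun z => if z = 0 then (1 : Int) else 0)).all (fun v => decide (v ≠ 0)) then some 0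
  else none

def find_overlaps (possibles : List (List Int)) : List (Option Int) :=
  (pvZipStar possibles).map pvGetVal

-- ===== PORT B =====
-- one row-processing step: update the two per-column flag lists
def pvStep (m : Nat) (st : List Bool × List Bool) (r : List Int) : List Bool × List Bool :=
  ((List.range m).map (fun j => st.1.getD j true && decide (r.getD j 0 ≠ 0)),
   (List.range m).map (fun j => st.2.getD j true && decide (r.getD j 0 = 0)))

def find_overlaps_alt (possibles : List (List Int)) : List (Option Int) :=
  match possibles with
  | [] => []
  | _ =>
    let m := pvMinLen possibles
    let st := possibles.foldl (pvStep m) (List.replicate m true, List.replicate m true)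
    (List.range m).map (fun j =>
      if st.1.getD j true then some 1
      else if st.2.getD j true then some 0
      else none)

-- ===== PRECONDITION & SPEC =====
def Spec_find_overlaps (possibles : List (List Int)) (out : List (Option Int)) : Prop := out = find_overlaps_alt possibles
instance (possibles : List (List Int)) (out : List (Option Int)) : Decidable (Spec_find_overlaps possibles out) := by unfold Spec_find_overlaps; infer_instance

-- ===== CLAIM (what is proved, stated in full; the proofs are below) =====
def Claim_equal_find_overlaps : Prop := ∀ (possibles : List (List Int)), Dom_find_overlaps possibles → Spec_find_overlaps possibles (find_overlaps possibles)

-- ===== LEMMAS AND PROOFS =====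

theorem getD_replicate_true (m j : Nat) : (List.replicate m true).getD j true = true := by
  simp only [List.getD_eq_getElem?_getD, List.getElem?_replicate]
  split <;> rfl

theorem getD_map_range {α : Type} (m j : Nat) (f : Nat → α) (d : α) (hj : j < m) :
    ((List.range m).map f).getD j d = f j := by
  simp [List.getD_eq_getElem?_getD, hj]

theorem fold_inv (rows : List (List Int)) (m : Nat) (st : List Bool × List Bool)
    (j : Nat) (hj : j < m) :
    ((rows.foldl (pvStep m) st).1.getD j true
       = (st.1.getD j true && rows.all (fun r => decide (r.getD j 0 ≠ 0)))) ∧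
    ((rows.foldl (pvStep m) st).2.getD j true
       = (st.2.getD j true && rows.all (fun r => decide (r.getD j 0 = 0)))) := by
  induction rows generalizing st with
  | nil => simp
  | cons r rs ih =>
    have h := ih (pvStep m st r)
    simp only [List.foldl_cons, List.all_cons] at *
    rw [h.1, h.2, pvStep, getD_map_range m j _ _ hj, getD_map_range m j _ _ hj]
    constructor <;> simp [Bool.and_assoc]

theorem getVal_col (rows : List (List Int)) (j : Nat) :
    pvGetVal (rows.map (fun r => r.getD j 0))
      = (if rows.all (fun r => decide (r.getD j 0 ≠ 0)) then some 1
         else if rows.all (fun r => decide (r.getD j 0 = 0)) then some (0 : Int)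
         else none) := by
  unfold pvGetVal
  have h1 : (rows.map (fun r => r.getD j 0)).all (fun z => decide (z ≠ 0))
      = rows.all (fun r => decide (r.getD j 0 ≠ 0)) := by
    simp only [List.all_map]; rfl
  have h2 : ((rows.map (fun r => r.getD j 0)).map (fun z => if z = 0 then (1 : Int) else 0)).all
        (fun v => decide (v ≠ 0))
      = rows.all (fun r => decide (r.getD j 0 = 0)) := by
    simp only [List.map_map, List.all_map]
    congr 1
    funext r
    by_cases h : r.getD j 0 = 0 <;> simp [h]  -- split on z == 0
  rw [h1, h2]

-- ===== VERDICT (by name: the statement is the Claim_ definition above) =====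
theorem find_overlaps_spec : Claim_equal_find_overlaps := by
  intro possibles _
  unfold Spec_find_overlaps find_overlaps find_overlaps_alt pvZipStar
  match possibles with
  | [] => rfl
  | p :: ps =>
    simp only [List.map_map]
    apply List.map_congr_left
    intro j hj
    have hjm : j < pvMinLen (p :: ps) := List.mem_range.mp hj
    have hinv := fold_inv (p :: ps) (pvMinLen (p :: ps))
      (List.replicate (pvMinLen (p :: ps)) true, List.replicate (pvMinLen (p :: ps)) true) j hjm
    simp only [getD_replicate_true, Bool.true_and] at hinv
    simp only [Function.comp, getVal_col, hinv.1, hinv.2]
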